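-- pv_equiv track=rewrite | github.com/shibing624/pytextclassifier | classifier/xgb.py | document_features
-- ===== SOURCE A (Python) =====
-- def document_features(word_features, TF, data, num):
--     '''
--     计算每一篇新闻的特征向量权重。即将文件从分词列表转化为分类器可以识别的特征向量输入。
--     :param word_features:
--     :param TFIDF:
--     :param document: 分词列表。存储在train_set,test_set中
--     :param cla: 类别
--     :param num: 文件编号
--     :return: 返回该文件的特征向量权重
--     '''
--     document_words = set(data)
--     features = []
--     for i, word in enumerate(word_features):
--         if word in document_words:
--             features.append(1)  # TF[num][word]#*log(N/(A[cla][word]+B[cla][word]))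
--         else:
--             features.append(0)
--     return features
-- ===== SOURCE B (Python) =====
-- def document_features(word_features, TF, data, num):
--     # Inverted index: word -> all its positions in word_features (handles duplicates),
--     # then scan the document's distinct words and write 1s into those positions.
--     index = {}
--     for i, word in enumerate(word_features):
--         index.setdefault(word, []).append(i)
--     features = [0] * len(word_features)
--     for word in set(data):
--         for p in index.get(word, ()):
--             features[p] = 1
--     return features
-- ===== Notes on version B (the rewrite author's own statement) =====
-- stated objective: alternative
-- what changed: Replaces 'scan the feature list and test membership in set(data)' by an inverted index from each feature word to all its positions, a zero vector, and a scan of the document's distinct words that writes 1s through the index.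
import Mathlib
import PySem

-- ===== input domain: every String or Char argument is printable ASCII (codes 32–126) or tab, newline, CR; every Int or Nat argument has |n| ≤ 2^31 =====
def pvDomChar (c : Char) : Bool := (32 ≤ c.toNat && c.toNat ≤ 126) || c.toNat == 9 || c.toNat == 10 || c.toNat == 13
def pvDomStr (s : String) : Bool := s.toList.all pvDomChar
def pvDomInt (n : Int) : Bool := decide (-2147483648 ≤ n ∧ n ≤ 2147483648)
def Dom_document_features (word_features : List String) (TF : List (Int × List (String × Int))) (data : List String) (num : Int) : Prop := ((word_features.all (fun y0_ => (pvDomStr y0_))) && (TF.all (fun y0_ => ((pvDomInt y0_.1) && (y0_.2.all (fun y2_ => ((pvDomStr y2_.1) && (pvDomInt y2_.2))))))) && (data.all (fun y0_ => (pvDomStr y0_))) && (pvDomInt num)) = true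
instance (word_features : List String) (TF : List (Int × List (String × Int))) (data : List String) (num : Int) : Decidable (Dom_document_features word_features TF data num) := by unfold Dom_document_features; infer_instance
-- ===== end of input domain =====

-- B builds an inverted index word→positions and writes 1s into a zero vector from the document's
-- distinct words, instead of A's scan of word_features testing membership in set(data): alternative
-- decomposition, same result.

-- ===== PORT A =====
def document_features (word_features : List String) (TF : List (Int × List (String × Int))) (data : List String) (num : Int) : List Int :=
  let document_words := PySem.Set.ofList data
  (PySem.List.enumerate word_features).foldl
    (fun features p =>
      if PySem.Set.contains document_words p.2 then features ++ [(1 : Int)]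
      else features ++ [(0 : Int)]) []

-- ===== PORT B =====
def document_features_alt (word_features : List String) (TF : List (Int × List (String × Int))) (data : List String) (num : Int) : List Int :=
  -- index.setdefault(word, []).append(i)  ==  modify word [] (· ++ [i])
  let index : PySem.Dict String (List Int) :=
    (PySem.List.enumerate word_features).foldl
      (fun d p => PySem.Dict.modify d p.2 [] (fun l => l ++ [p.1])) PySem.Dict.empty
  let features : List Int := List.replicate word_features.length 0
  (PySem.Set.ofList data).foldl
    (fun fs w => (PySem.Dict.getD index w []).foldl
      (fun fs p => PySem.List.pySetD fs p (1 : Int)) fs) features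

-- ===== PRECONDITION & SPEC =====
def Spec_document_features (word_features : List String) (TF : List (Int × List (String × Int))) (data : List String) (num : Int) (out : List Int) : Prop := out = document_features_alt word_features TF data num
instance (word_features : List String) (TF : List (Int × List (String × Int))) (data : List String) (num : Int) (out : List Int) : Decidable (Spec_document_features word_features TF data num out) := by unfold Spec_document_features; infer_instance

-- ===== CLAIM (what is proved, stated in full; the proofs are below) =====
def Claim_equal_document_features : Prop := ∀ (word_features : List String) (TF : List (Int × List (String × Int))) (data : List String) (num : Int), Dom_document_features word_features TF data num → Spec_document_features word_features TF data num (document_features word_features TF data num)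

-- ===== LEMMAS AND PROOFS =====

-- A's loop is a map over word_features
lemma A_eq_map (wf : List String) (TF : List (Int × List (String × Int))) (data : List String) (num : Int) :
    document_features wf TF data num
      = wf.map (fun w => if PySem.Set.contains (PySem.Set.ofList data) w then (1 : Int) else 0) := by
  unfold document_features
  have h : ∀ (fs : List Int),
      (PySem.List.enumerate wf).foldl
        (fun features p =>
          if PySem.Set.contains (PySem.Set.ofList data) p.2 then features ++ [(1 : Int)]
          else features ++ [(0 : Int)]) fs
      = fs ++ wf.map (fun w => if PySem.Set.contains (PySem.Set.ofList data) w then (1 : Int) else 0) := by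
    have h2 : ∀ (s : Int) (fs : List Int),
        (PySem.List.enumerate wf s).foldl
          (fun features p =>
            if PySem.Set.contains (PySem.Set.ofList data) p.2 then features ++ [(1 : Int)]
            else features ++ [(0 : Int)]) fs
        = fs ++ wf.map (fun w => if PySem.Set.contains (PySem.Set.ofList data) w then (1 : Int) else 0) := by
      induction wf with
      | nil => intro s fs; simp [PySem.List.enumerate_nil]
      | cons x xs ih =>
          intro s fs
          rw [PySem.List.enumerate_cons, List.foldl_cons, ih (s + 1)]
          by_cases hx : x ∈ data <;> simp [pysem, hx]
    exact fun fs => h2 0 fs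
  simpa using h []

-- the inverted index maps w to exactly the (filtered) enumerate positions of w
lemma getD_index (wf : List String) (w : String) :
    PySem.Dict.getD
      ((PySem.List.enumerate wf).foldl
        (fun d p => PySem.Dict.modify d p.2 [] (fun l => l ++ [p.1])) PySem.Dict.empty) w []
      = ((PySem.List.enumerate wf).filter (fun q => q.2 == w)).map (·.1) := by
  have hswap : (PySem.List.enumerate wf).foldl
      (fun d p => PySem.Dict.modify d p.2 [] (fun l => l ++ [p.1])) (PySem.Dict.empty (κ := String) (ν := List Int))
      = ((PySem.List.enumerate wf).map Prod.swap).foldl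
        (fun d q => PySem.Dict.modify d q.1 [] (fun l => l ++ [q.2])) PySem.Dict.empty := by
    rw [List.foldl_map]
    simp only [Prod.fst_swap, Prod.snd_swap]
  rw [hswap, PySem.Dict.getD_foldl_modify_append]
  simp [List.filter_map, List.map_map, Function.comp_def, Prod.swap]

-- membership in the filtered-enumerate position list characterises the words of wf
lemma mem_positions (wf : List String) (w : String) (p : Int) :
    ∀ s : Int, (p ∈ (((PySem.List.enumerate wf s).filter (fun q => q.2 == w)).map (·.1)) ↔
      ∃ k : Nat, k < wf.length ∧ p = s + (k : Int) ∧ wf[k]? = some w) := by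
  induction wf with
  | nil => intro s; simp [PySem.List.enumerate_nil]
  | cons x xs ih =>
      intro s
      rw [PySem.List.enumerate_cons]
      by_cases hx : x = w
      · subst hx
        simp only [List.filter_cons, beq_self_eq_true, if_true, List.map_cons, List.mem_cons, ih (s + 1)]
        constructor
        · rintro (rfl | ⟨k, hk, rfl, hkw⟩)
          · exact ⟨0, by simp⟩
          · exact ⟨k + 1, by simpa using hk, by push_cast; ring, by simpa using hkw⟩
        · rintro ⟨k, hk, rfl, hkw⟩
          cases k with
          | zero => left; simp
          | succ k => right; exact ⟨k, by simpa using hk, by push_cast; ring, by simpa using hkw⟩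
      · simp only [List.filter_cons, beq_iff_eq, hx, if_false, ih (s + 1)]
        constructor
        · rintro ⟨k, hk, rfl, hkw⟩
          exact ⟨k + 1, by simpa using hk, by push_cast; ring, by simpa using hkw⟩
        · rintro ⟨k, hk, rfl, hkw⟩
          cases k with
          | zero => exact absurd (by simpa using hkw) hx
          | succ k => exact ⟨k, by simpa using hk, by push_cast; ring, by simpa using hkw⟩

lemma foldl_pySetD_length (ps : List Int) (fs : List Int) :
    (ps.foldl (fun fs p => PySem.List.pySetD fs p (1 : Int)) fs).length = fs.length := by
  induction ps generalizing fs with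
  | nil => rfl
  | cons p ps ih => rw [List.foldl_cons, ih]; exact PySem.List.length_pySetD fs p 1

lemma foldl_pySetD_getElem? (ps : List Int) (fs : List Int) (j : Nat)
    (hp : ∀ p ∈ ps, 0 ≤ p) :
    (ps.foldl (fun fs p => PySem.List.pySetD fs p (1 : Int)) fs)[j]?
      = if (j : Int) ∈ ps ∧ j < fs.length then some 1 else fs[j]? := by
  induction ps generalizing fs with
  | nil => simp
  | cons p ps ih =>
      rw [List.foldl_cons, ih _ (fun q hq => hp q (List.mem_cons_of_mem _ hq))]
      have hp0 : 0 ≤ p := hp p (List.mem_cons_self ..)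
      rw [PySem.List.pySetD_of_nonneg fs 1 hp0]
      have hlen : (fs.set p.toNat 1).length = fs.length := List.length_set ..
      rw [hlen, List.getElem?_set]
      by_cases hpj : p.toNat = j
      · have hpe : (j : Int) = p := by omega
        by_cases hj : j < fs.length <;> simp_all [List.mem_cons]
      · have hpe : (j : Int) ≠ p := by omega
        simp_all [List.mem_cons]

lemma foldl_outer_getElem? (idx : String → List Int) (ws : List String) (fs : List Int) (j : Nat)
    (hidx : ∀ w p, p ∈ idx w → 0 ≤ p) :
    (ws.foldl (fun fs w => (idx w).foldl (fun fs p => PySem.List.pySetD fs p (1 : Int)) fs) fs)[j]?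
      = if (∃ w ∈ ws, (j : Int) ∈ idx w) ∧ j < fs.length then some 1 else fs[j]? := by
  induction ws generalizing fs with
  | nil => simp
  | cons w ws ih =>
      rw [List.foldl_cons, ih, foldl_pySetD_length, foldl_pySetD_getElem? _ _ _ (hidx w)]
      by_cases hj : j < fs.length <;> by_cases h1 : (j : Int) ∈ idx w <;>
        by_cases h2 : ∃ w' ∈ ws, (j : Int) ∈ idx w' <;>
        simp_all [List.mem_cons]

-- ===== VERDICT (by name: the statement is the Claim_ definition above) =====
theorem document_features_spec : Claim_equal_document_features := by
  intro wf TF data num _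
  unfold Spec_document_features
  rw [A_eq_map]
  unfold document_features_alt
  apply Eq.symm
  apply List.ext_getElem?
  intro j
  rw [foldl_outer_getElem?]
  · rw [List.length_replicate]
    have hchar : ∀ w : String,
        ((j : Int) ∈ PySem.Dict.getD
          ((PySem.List.enumerate wf).foldl
            (fun d p => PySem.Dict.modify d p.2 [] (fun l => l ++ [p.1])) PySem.Dict.empty) w [])
        ↔ (j < wf.length ∧ wf[j]? = some w) := by
      intro w
      rw [getD_index, mem_positions wf w (j : Int) 0]
      constructor
      · rintro ⟨k, hk, hjk, hkw⟩
        have : j = k := by omega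
        subst this; exact ⟨hk, hkw⟩
      · rintro ⟨hj, hjw⟩; exact ⟨j, hj, by omega, hjw⟩
    by_cases hj : j < wf.length
    · have hsome : wf[j]? = some (wf[j]'hj) := List.getElem?_eq_getElem hj
      have hcond : (∃ w ∈ PySem.Set.ofList data,
          (j : Int) ∈ PySem.Dict.getD
            ((PySem.List.enumerate wf).foldl
              (fun d p => PySem.Dict.modify d p.2 [] (fun l => l ++ [p.1])) PySem.Dict.empty) w [])
          ↔ wf[j]'hj ∈ data := by
        constructor
        · rintro ⟨w, hwmem, hwidx⟩
          rcases (hchar w).mp hwidx with ⟨-, hw⟩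
          have : wf[j]'hj = w := by rw [hsome] at hw; exact Option.some.inj hw
          subst this
          exact (PySem.Set.mem_ofList data _).mp hwmem
        · intro hmem
          exact ⟨wf[j]'hj, (PySem.Set.mem_ofList data _).mpr hmem,
            (hchar _).mpr ⟨hj, hsome⟩⟩
      rw [List.getElem?_map, hsome]
      by_cases hd : wf[j]'hj ∈ data
      · simp only [hcond, hd, hj, and_true, if_pos, Option.map_some]
        simp [pysem, hd]
      · have : ¬ ((∃ w ∈ PySem.Set.ofList data,
            (j : Int) ∈ PySem.Dict.getD
              ((PySem.List.enumerate wf).foldl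
                (fun d p => PySem.Dict.modify d p.2 [] (fun l => l ++ [p.1])) PySem.Dict.empty) w []) ∧ j < wf.length) := by
          rw [hcond]; tauto
        rw [if_neg this, List.getElem?_replicate]
        simp [pysem, hd, hj]
    · have hnone : (wf.map (fun w => if PySem.Set.contains (PySem.Set.ofList data) w then (1:Int) else 0))[j]? = none := by
        rw [List.getElem?_eq_none]; simpa using Nat.le_of_not_lt hj
      rw [hnone, if_neg (by tauto), List.getElem?_replicate, if_neg hj]
  · intro w p hp
    rw [getD_index, mem_positions wf w p 0] at hp
    rcases hp with ⟨k, -, rfl, -⟩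
    omega
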